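-- pv_equiv track=rewrite | github.com/Ren-97/CodePath2025Summer | Unit2/section1_advanced1.py | min_steps_to_match_maps
-- ===== SOURCE A (Python) =====
-- import collections
--
-- def min_steps_to_match_maps(map1, map2):
--     count1 = collections.Counter(map1)
--     count2 = collections.Counter(map2)
--     res = 0
--     for char in count1:
--         if count1[char] > count2.get(char, 0):
--             res += count1[char] - count2.get(char, 0)
--     return res
-- ===== SOURCE B (Python) =====
-- import collections
--
-- def min_steps_to_match_maps(map1, map2):
--     budget = collections.Counter(map2)
--     res = 0
--     for char in map1:
--         if budget.get(char, 0) > 0: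
--             budget[char] -= 1
--         else:
--             res += 1
--     return res
-- ===== Notes on version B (the rewrite author's own statement) =====
-- stated objective: alternative
-- what changed: Instead of building two Counters and summing the positive per-key count differences, B keeps a single consumable budget Counter of map2 and makes one pass over map1's characters, decrementing the budget on a match and counting the character as surplus otherwise.
import Mathlib
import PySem

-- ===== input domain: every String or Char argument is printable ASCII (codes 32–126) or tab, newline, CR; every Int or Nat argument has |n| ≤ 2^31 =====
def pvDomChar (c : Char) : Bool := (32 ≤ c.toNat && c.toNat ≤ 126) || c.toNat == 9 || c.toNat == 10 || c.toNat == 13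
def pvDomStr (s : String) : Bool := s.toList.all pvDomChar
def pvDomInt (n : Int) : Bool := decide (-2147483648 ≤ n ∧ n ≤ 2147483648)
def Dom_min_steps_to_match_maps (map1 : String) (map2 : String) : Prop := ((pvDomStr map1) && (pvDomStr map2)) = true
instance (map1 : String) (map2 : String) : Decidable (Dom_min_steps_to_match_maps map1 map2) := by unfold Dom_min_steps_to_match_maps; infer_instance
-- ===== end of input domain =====

-- B replaces A's two Counters plus positive-difference summation by a single consumable
-- budget Counter of map2 and one pass over map1's characters (objective: alternative).

-- ===== PORT A =====
def min_steps_to_match_maps (map1 : String) (map2 : String) : Int :=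
  let count1 := PySem.Dict.counter map1.toList
  let count2 := PySem.Dict.counter map2.toList
  count1.keys.foldl (fun res char =>
    if count1.getD char 0 > count2.getD char 0 then
      res + (count1.getD char 0 - count2.getD char 0)
    else res) 0

-- ===== PORT B =====
-- the 'for char in map1' loop of B, carrying the mutable budget and res
def pvBudgetLoop : List Char → PySem.Dict Char Int → Int → Int
  | [], _, res => res
  | char :: rest, budget, res =>
    if budget.getD char 0 > 0 then
      pvBudgetLoop rest (budget.insert char (budget.getD char 0 - 1)) res
    else
      pvBudgetLoop rest budget (res + 1)

def min_steps_to_match_maps_alt (map1 : String) (map2 : String) : Int :=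
  pvBudgetLoop map1.toList (PySem.Dict.counter map2.toList) 0

-- ===== PRECONDITION & SPEC =====
def Spec_min_steps_to_match_maps (map1 : String) (map2 : String) (out : Int) : Prop := out = min_steps_to_match_maps_alt map1 map2
instance (map1 : String) (map2 : String) (out : Int) : Decidable (Spec_min_steps_to_match_maps map1 map2 out) := by unfold Spec_min_steps_to_match_maps; infer_instance

-- ===== CLAIM (what is proved, stated in full; the proofs are below) =====
def Claim_equal_min_steps_to_match_maps : Prop := ∀ (map1 : String) (map2 : String), Dom_min_steps_to_match_maps map1 map2 → Spec_min_steps_to_match_maps map1 map2 (min_steps_to_match_maps map1 map2)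

-- ===== LEMMAS AND PROOFS =====

-- The budget loop computes the surplus sum, for any nonnegative budget.
lemma pvBudgetLoop_eq_sum (l : List Char) (budget : PySem.Dict Char Int) (res : Int)
    (hb : ∀ c, 0 ≤ budget.getD c 0) :
    pvBudgetLoop l budget res
      = res + ∑ c ∈ l.toFinset, max ((l.count c : Int) - budget.getD c 0) 0 := by
  induction l generalizing budget res with
  | nil => simp [pvBudgetLoop]
  | cons c t ih =>
    by_cases hpos : budget.getD c 0 > 0
    · have hb' : ∀ x, 0 ≤ (budget.insert c (budget.getD c 0 - 1)).getD x 0 := by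
        intro x; rw [PySem.Dict.getD_insert]
        split_ifs with hx
        · omega
        · exact hb x
      rw [pvBudgetLoop, if_pos hpos, ih _ _ hb']
      congr 1
      have hterm : ∀ x, max (((c :: t).count x : Int) - budget.getD x 0) 0
          = max ((t.count x : Int) - (budget.insert c (budget.getD c 0 - 1)).getD x 0) 0 := by
        intro x
        rw [PySem.Dict.getD_insert, List.count_cons]
        by_cases hx : x = c
        · subst hx; simp; omega
        · simp [hx, Ne.symm hx]
      by_cases hmem : c ∈ t.toFinset
      · rw [List.toFinset_cons, Finset.insert_eq_self.mpr hmem]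
        exact Finset.sum_congr rfl (fun x _ => (hterm x).symm)
      · rw [List.toFinset_cons, Finset.sum_insert hmem]
        have hc0 : (t.count c : Int) = 0 := by
          simp [List.count_eq_zero_of_not_mem (by simpa using hmem)]
        have h1 : max (((c :: t).count c : Int) - budget.getD c 0) 0 = 0 := by
          rw [List.count_cons]; simp [hc0]
          omega
        rw [h1, zero_add]
        refine Finset.sum_congr rfl (fun x hx => ?_)
        have hxc : x ≠ c := fun h => hmem (h ▸ hx)
        rw [hterm x]
    · have hc0 : budget.getD c 0 = 0 := le_antisymm (by omega) (hb c)
      rw [pvBudgetLoop, if_neg hpos, ih _ _ hb]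
      have key : ∑ x ∈ (c :: t).toFinset, max (((c :: t).count x : Int) - budget.getD x 0) 0
          = 1 + ∑ x ∈ t.toFinset, max ((t.count x : Int) - budget.getD x 0) 0 := by
        have hcs : c ∈ (c :: t).toFinset := by simp
        rw [← Finset.add_sum_erase _ _ hcs]
        have herase : ((c :: t).toFinset).erase c = t.toFinset.erase c := by
          rw [List.toFinset_cons, Finset.erase_insert_eq_erase]
        have hfc : max (((c :: t).count c : Int) - budget.getD c 0) 0
            = (t.count c : Int) + 1 := by
          rw [List.count_cons, hc0]; simp; omega
        rw [herase, hfc]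
        have hrest : ∀ x ∈ t.toFinset.erase c,
            max (((c :: t).count x : Int) - budget.getD x 0) 0
              = max ((t.count x : Int) - budget.getD x 0) 0 := by
          intro x hx
          have hxc : x ≠ c := (Finset.mem_erase.mp hx).1
          rw [List.count_cons]
          simp [Ne.symm hxc]
        rw [Finset.sum_congr rfl hrest]
        by_cases hmem : c ∈ t.toFinset
        · rw [← Finset.add_sum_erase _ (fun x => max ((t.count x : Int) - budget.getD x 0) 0) hmem]
          have : max ((t.count c : Int) - budget.getD c 0) 0 = (t.count c : Int) := by
            rw [hc0]; simp
          rw [this]; ring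
        · have hc0' : (t.count c : Int) = 0 := by
            simp [List.count_eq_zero_of_not_mem (by simpa using hmem)]
          rw [Finset.erase_eq_of_notMem hmem, hc0']; ring
      rw [key]; ring

-- Port A computes the same surplus sum.
lemma portA_eq_sum (map1 map2 : String) :
    min_steps_to_match_maps map1 map2
      = ∑ c ∈ map1.toList.toFinset,
          max ((map1.toList.count c : Int) - (map2.toList.count c : Int)) 0 := by
  have h0 : min_steps_to_match_maps map1 map2
      = (PySem.Dict.counter map1.toList).keys.foldl (fun res char =>
          if (PySem.Dict.counter map1.toList).getD char 0 > (PySem.Dict.counter map2.toList).getD char 0 then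
            res + ((PySem.Dict.counter map1.toList).getD char 0 - (PySem.Dict.counter map2.toList).getD char 0)
          else res) 0 := rfl
  rw [h0]
  rw [PySem.Dict.keys_counter, ← PySem.List.dedup_eq_ofList]
  rw [PySem.List.foldl_congr_mem _ _
      (fun res char => res + max ((map1.toList.count char : Int) - (map2.toList.count char : Int)) 0) _
      (by
        intro acc x _
        dsimp only
        rw [PySem.Dict.getD_counter, PySem.Dict.getD_counter]
        split_ifs with h
        · congr 1; omega
        · omega)]
  rw [PySem.List.foldl_add, zero_add]
  rw [← List.sum_toFinset _ (PySem.List.nodup_dedup map1.toList)]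
  have hset : (PySem.List.dedup map1.toList).toFinset = map1.toList.toFinset := by
    ext x; simp
  rw [hset]

-- ===== VERDICT (by name: the statement is the Claim_ definition above) =====
theorem min_steps_to_match_maps_spec : Claim_equal_min_steps_to_match_maps := by
  intro map1 map2 _
  unfold Spec_min_steps_to_match_maps min_steps_to_match_maps_alt
  rw [portA_eq_sum,
    pvBudgetLoop_eq_sum _ _ _ (fun c => by rw [PySem.Dict.getD_counter]; positivity),
    zero_add]
  refine Finset.sum_congr rfl (fun x _ => ?_)
  rw [PySem.Dict.getD_counter]
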